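-- pv_equiv track=rewrite | github.com/gebdevalk/musics | src/algorittm/advanced_rhythm.py | rhythm_necklace
-- ===== SOURCE A (Python) =====
-- from typing import List, Tuple, Optional, Dict, Any, Union, Callable
--
-- def rhythm_necklace(pattern: List[int]) -> List[List[int]]:
--     """
--     Generate all rotations of a pattern (the rhythm necklace).
--
--     Parameters:
--     pattern (List[int]): Base pattern
--
--     Returns:
--     List[List[int]]: All unique rotations (necklace equivalence class)
--     """
--     if not pattern:
--         return []
--
--     n = len(pattern)
--     necklaces = []
--
--     # Generate all rotations
--     for i in range(n):
--         rotated = pattern[i:] + pattern[:i]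
--
--         # Check if this rotation is already in our list
--         if rotated not in necklaces:
--             necklaces.append(rotated)
--
--     return necklaces
-- ===== SOURCE B (Python) =====
-- def rhythm_necklace(pattern):
--     """Unique rotations via the minimal period: find the smallest p with
--     pattern[p:]+pattern[:p] == pattern (p = len at worst), then the distinct
--     rotations are exactly rotations 0..p-1, in first-occurrence order."""
--     n = len(pattern)
--     if n == 0:
--         return []
--     p = next(p for p in range(1, n + 1) if pattern[p:] + pattern[:p] == pattern)
--     return [pattern[i:] + pattern[:i] for i in range(p)]
-- ===== Notes on version B (the rewrite author's own statement) =====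
-- stated objective: alternative
-- what changed: Replaced the generate-all-n-rotations-and-deduplicate-by-membership loop with computing the minimal period p of the pattern and emitting exactly the p distinct rotations directly.
import Mathlib
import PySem

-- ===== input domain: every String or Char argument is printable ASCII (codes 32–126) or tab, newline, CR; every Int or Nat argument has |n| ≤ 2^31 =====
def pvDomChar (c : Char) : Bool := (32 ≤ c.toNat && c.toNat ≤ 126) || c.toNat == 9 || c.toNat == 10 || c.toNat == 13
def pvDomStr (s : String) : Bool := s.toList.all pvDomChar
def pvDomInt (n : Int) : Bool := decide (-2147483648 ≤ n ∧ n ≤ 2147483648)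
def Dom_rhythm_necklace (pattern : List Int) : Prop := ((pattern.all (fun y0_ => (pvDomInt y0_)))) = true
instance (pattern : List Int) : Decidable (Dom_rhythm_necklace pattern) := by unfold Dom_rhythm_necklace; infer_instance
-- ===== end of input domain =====

-- B replaces A's generate-all-rotations-and-deduplicate loop with a minimal-period computation:
-- find the smallest p with pattern[p:]+pattern[:p] == pattern, then emit exactly rotations 0..p-1 (objective: alternative).


-- ===== PORT A =====
-- literal port of A: for i in range(n), rotate, append if not already present
def rhythm_necklace (pattern : List Int) : List (List Int) :=
  if pattern = [] then []
  else
    let n : Int := pattern.length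
    (PySem.List.pyRange 0 n 1).foldl
      (fun necklaces i =>
        let rotated := PySem.List.slice pattern (some i) none ++ PySem.List.slice pattern none (some i)
        if rotated ∈ necklaces then necklaces else necklaces ++ [rotated])
      []

-- ===== PORT B =====
-- pattern[i:] + pattern[:i]
def pvRot (pattern : List Int) (i : Int) : List Int :=
  PySem.List.slice pattern (some i) none ++ PySem.List.slice pattern none (some i)

-- literal port of B: minimal period p, then the p rotations.  Python's `next(...)` is a
-- first-match search over range(1, n+1); it always finds a value (p = n works), so the
-- `.getD n` default is never taken.
def rhythm_necklace_alt (pattern : List Int) : List (List Int) :=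
  let n : Int := pattern.length
  if n = 0 then []
  else
    let p : Int := ((PySem.List.pyRange 1 (n + 1) 1).find? (fun p => pvRot pattern p == pattern)).getD n
    (PySem.List.pyRange 0 p 1).map (fun i => pvRot pattern i)

-- ===== PRECONDITION & SPEC =====
def Spec_rhythm_necklace (pattern : List Int) (out : List (List Int)) : Prop := out = rhythm_necklace_alt pattern
instance (pattern : List Int) (out : List (List Int)) : Decidable (Spec_rhythm_necklace pattern out) := by unfold Spec_rhythm_necklace; infer_instance

-- ===== CLAIM (what is proved, stated in full; the proofs are below) =====
def Claim_equal_rhythm_necklace : Prop := ∀ (pattern : List Int), Dom_rhythm_necklace pattern → Spec_rhythm_necklace pattern (rhythm_necklace pattern)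

-- ===== LEMMAS AND PROOFS =====

-- drop/take rotation on Nat indices (proof-side only)
def rotN (pattern : List Int) (k : Nat) : List Int := pattern.drop k ++ pattern.take k

theorem pvRot_eq_rotN (pattern : List Int) (i : Int) (h0 : 0 ≤ i) :
    pvRot pattern i = rotN pattern i.toNat := by
  simp [pvRot, rotN, PySem.List.slice_from pattern h0, PySem.List.slice_to pattern h0]

theorem rotN_eq_rotate (pattern : List Int) (k : Nat) (h : k ≤ pattern.length) :
    rotN pattern k = pattern.rotate k := (List.rotate_eq_drop_append_take h).symm

-- generic: find? over an increasing Int range returns the least satisfying element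
theorem find?_pyRange_eq {f : Int → Bool} {a b x : Int}
    (hax : a ≤ x) (hxb : x < b) (hx : f x = true)
    (hmin : ∀ y, a ≤ y → y < x → f y = false) :
    (PySem.List.pyRange a b 1).find? f = some x := by
  have hd : 0 ≤ x - a := by omega
  generalize hk : (x - a).toNat = k
  induction k generalizing a with
  | zero =>
    have : a = x := by omega
    subst this
    rw [PySem.List.pyRange_one_cons hxb, List.find?_cons, hx]
  | succ k ih =>
    have hax' : a < x := by omega
    rw [PySem.List.pyRange_one_cons (by omega : a < b), List.find?_cons,
      hmin a le_rfl hax']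
    show (PySem.List.pyRange (a + 1) b 1).find? f = some x
    exact ih (by omega) (fun y hy1 hy2 => hmin y (by omega) hy2) (by omega) (by omega)

theorem rotate_mod_period (pattern : List Int) (p : Nat) (hp : 0 < p)
    (hrot : pattern.rotate p = pattern) (m : Nat) :
    pattern.rotate m = pattern.rotate (m % p) := by
  induction m using Nat.strong_induction_on with
  | _ m ih =>
    by_cases h : m < p
    · rw [Nat.mod_eq_of_lt h]
    · have hm : m = p + (m - p) := by omega
      rw [hm, ← List.rotate_rotate, hrot, ih (m - p) (by omega), Nat.add_mod_left]

-- main structure lemma: under pattern ≠ [], with p the minimal period (1 ≤ p ≤ n),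
-- A's dedup fold over range n produces exactly the first p rotations.
theorem foldl_dedup_eq (pattern : List Int) (p : Nat)
    (hp1 : 1 ≤ p) (hpn : p ≤ pattern.length)
    (hrot : pattern.rotate p = pattern)
    (hmin : ∀ k, 1 ≤ k → k < p → pattern.rotate k ≠ pattern)
    (m : Nat) (hm : m ≤ pattern.length) :
    ((List.range m).foldl
      (fun necklaces k =>
        let rotated := rotN pattern k
        if rotated ∈ necklaces then necklaces else necklaces ++ [rotated]) [])
    = (List.range (min m p)).map (rotN pattern) := by
  -- distinct rotations below p
  have hinj : ∀ i j : Nat, i < j → j < p → pattern.rotate i ≠ pattern.rotate j := by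
    intro i j hij hjp heq
    have hcancel : (pattern.rotate i).rotate (pattern.length - i) = pattern := by
      rw [List.rotate_rotate]
      have : i + (pattern.length - i) = pattern.length := by omega
      rw [this, List.rotate_length]
    rw [heq, List.rotate_rotate] at hcancel
    have harith : j + (pattern.length - i) = pattern.length + (j - i) := by omega
    rw [harith, ← List.rotate_rotate, List.rotate_length] at hcancel
    exact hmin (j - i) (by omega) (by omega) hcancel
  induction m with
  | zero => simp
  | succ m ih =>
    have hm' : m ≤ pattern.length := by omega
    rw [List.range_succ, List.foldl_append, ih hm']
    simp only [List.foldl_cons, List.foldl_nil]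
    by_cases hmp : m < p
    · have hmem : rotN pattern m ∉ (List.range (min m p)).map (rotN pattern) := by
        simp only [List.mem_map, List.mem_range, not_exists, not_and]
        intro i hi
        have hip : i < p := by omega
        rw [rotN_eq_rotate _ _ (by omega), rotN_eq_rotate _ _ hm']
        exact hinj i m (by omega) hmp
      rw [if_neg hmem]
      have h1 : min m p = m := by omega
      have h2 : min (m + 1) p = m + 1 := by omega
      rw [h1, h2, List.range_succ, List.map_append, List.map_singleton]
    · have hpm : p ≤ m := by omega
      have hmem : rotN pattern m ∈ (List.range (min m p)).map (rotN pattern) := by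
        have h1 : min m p = p := by omega
        rw [h1]
        have hmp2 : m % p < p := Nat.mod_lt _ (by omega)
        refine List.mem_map.mpr ⟨m % p, List.mem_range.mpr hmp2, ?_⟩
        rw [rotN_eq_rotate _ _ (by omega), rotN_eq_rotate _ _ hm',
          rotate_mod_period pattern p (by omega) hrot m]
      rw [if_pos hmem]
      have : min (m + 1) p = min m p := by omega
      rw [this]

theorem rhythm_necklace_eq_alt (pattern : List Int) :
    rhythm_necklace pattern = rhythm_necklace_alt pattern := by
  by_cases hnil : pattern = []
  · subst hnil; rfl
  · have hn : 0 < pattern.length := List.length_pos_iff.mpr hnil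
    -- the minimal period exists
    have hex : ∃ k, pattern.rotate (k + 1) = pattern := by
      refine ⟨pattern.length - 1, ?_⟩
      have : pattern.length - 1 + 1 = pattern.length := by omega
      rw [this, List.rotate_length]
    set p : Nat := Nat.find hex + 1 with hpdef
    have hrot : pattern.rotate p = pattern := Nat.find_spec hex
    have hmin : ∀ k, 1 ≤ k → k < p → pattern.rotate k ≠ pattern := by
      intro k hk1 hkp
      have := Nat.find_min hex (m := k - 1) (by omega)
      have hk : k - 1 + 1 = k := by omega
      rwa [hk] at this
    have hpn : p ≤ pattern.length := by
      have : Nat.find hex ≤ pattern.length - 1 := by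
        apply Nat.find_le
        have : pattern.length - 1 + 1 = pattern.length := by omega
        rw [this, List.rotate_length]
      omega
    -- B's find? returns exactly (p : Int)
    have hfind : ((PySem.List.pyRange 1 ((pattern.length : Int) + 1) 1).find?
        (fun i => pvRot pattern i == pattern)) = some (p : Int) := by
      apply find?_pyRange_eq (by omega) (by exact_mod_cast by omega)
      · rw [pvRot_eq_rotN pattern _ (by positivity)]
        simp only [Int.toNat_natCast]
        rw [rotN_eq_rotate _ _ hpn, hrot]
        simp
      · intro y h1y hyp
        rw [pvRot_eq_rotN pattern _ (by omega)]
        have hy : y = (y.toNat : Int) := by omega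
        have hylt : y.toNat < p := by omega
        rw [rotN_eq_rotate _ _ (by omega)]
        simp only [beq_eq_false_iff_ne, ne_eq]
        exact hmin y.toNat (by omega) hylt
    -- reduce both sides
    unfold rhythm_necklace rhythm_necklace_alt
    rw [if_neg hnil, if_neg (by exact_mod_cast hn.ne' : (pattern.length : Int) ≠ 0)]
    simp only [hfind, Option.getD_some]
    rw [PySem.List.pyRange_zero_nat pattern.length, PySem.List.pyRange_zero_nat p,
      List.foldl_map, List.map_map]
    have hfun : (fun (necklaces : List (List Int)) (k : Nat) =>
        (fun (necklaces : List (List Int)) (i : Int) =>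
          let rotated := PySem.List.slice pattern (some i) none ++ PySem.List.slice pattern none (some i)
          if rotated ∈ necklaces then necklaces else necklaces ++ [rotated]) necklaces (k : Int))
        = (fun (necklaces : List (List Int)) (k : Nat) =>
            let rotated := rotN pattern k
            if rotated ∈ necklaces then necklaces else necklaces ++ [rotated]) := by
      funext acc k
      have h := pvRot_eq_rotN pattern (k : Int) (by positivity)
      simp only [pvRot, Int.toNat_natCast] at h
      simp only [h]
    refine Eq.trans (congrArg (fun F => (List.range pattern.length).foldl F ([] : List (List Int))) hfun) ?_
    refine Eq.trans (foldl_dedup_eq pattern p (by omega) hpn hrot hmin pattern.length le_rfl) ?_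
    have hminnp : min pattern.length p = p := by omega
    rw [hminnp]
    apply List.map_congr_left
    intro k hk
    show rotN pattern k = pvRot pattern (k : Int)
    rw [pvRot_eq_rotN pattern (k : Int) (by positivity), Int.toNat_natCast]

-- ===== VERDICT (by name: the statement is the Claim_ definition above) =====
theorem rhythm_necklace_spec : Claim_equal_rhythm_necklace := by
  intro pattern _
  exact rhythm_necklace_eq_alt pattern
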